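-- pv_equiv track=rewrite | github.com/iangalvao/PythonChessGame | app/controllers/commandHandler.py | parse_direction
-- ===== SOURCE A (Python) =====
-- def parse_direction(direction):
--     dir = (0, 0)
--     i = 0
--     j = 1
--     for directions in [[7, 8, 9], [3, 6, 9], [1, 2, 3], [1, 4, 7]]:
--         if direction in directions:
--             dir = (dir[0] + i, dir[1] + j)
--         aux = j
--         j = -i
--         i = aux
--     return dir
-- ===== SOURCE B (Python) =====
-- _DIRS = {7: (-1, 1), 8: (0, 1), 9: (1, 1),
--          4: (-1, 0),            6: (1, 0),
--          1: (-1, -1), 2: (0, -1), 3: (1, -1)}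
--
-- def parse_direction(direction):
--     return _DIRS.get(direction, (0, 0))
-- ===== Notes on version B (the rewrite author's own statement) =====
-- stated objective: simpler
-- what changed: Replaces the rotating-basis-vector loop over four digit groups with a single precomputed table mapping each numpad digit directly to its (dx,dy) vector.
import Mathlib
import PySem

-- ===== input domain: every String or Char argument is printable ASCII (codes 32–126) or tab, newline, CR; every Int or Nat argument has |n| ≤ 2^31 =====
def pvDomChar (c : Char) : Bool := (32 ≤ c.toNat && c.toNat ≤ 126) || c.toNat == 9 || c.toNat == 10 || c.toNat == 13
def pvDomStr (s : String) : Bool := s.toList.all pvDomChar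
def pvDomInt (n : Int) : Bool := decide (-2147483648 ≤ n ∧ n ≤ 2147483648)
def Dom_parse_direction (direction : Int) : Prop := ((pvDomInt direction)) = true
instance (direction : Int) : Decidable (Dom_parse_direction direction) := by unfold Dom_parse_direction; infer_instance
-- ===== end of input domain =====

-- B replaces A's rotating-basis loop with a direct digit→vector table lookup (simpler, same O(1) cost).

-- ===== PORT A =====
-- A's loop over the four digit groups, rotating the basis vector (i,j) each step;
-- ported as a fold over the same list with state (dir, i, j).
def parse_direction (direction : Int) : Int × Int :=
  let step := fun (st : (Int × Int) × Int × Int) (directions : List Int) =>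
    let dir := st.1; let i := st.2.1; let j := st.2.2
    let dir := if direction ∈ directions then (dir.1 + i, dir.2 + j) else dir
    (dir, j, -i)
  (([[7, 8, 9], [3, 6, 9], [1, 2, 3], [1, 4, 7]]).foldl step ((0, 0), 0, 1)).1

-- ===== PORT B =====
-- B's table: _DIRS.get(direction, (0,0)), ported as a match on the eight digits.
def parse_direction_alt (direction : Int) : Int × Int :=
  if direction = 7 then (-1, 1)
  else if direction = 8 then (0, 1)
  else if direction = 9 then (1, 1)
  else if direction = 4 then (-1, 0)
  else if direction = 6 then (1, 0)
  else if direction = 1 then (-1, -1)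
  else if direction = 2 then (0, -1)
  else if direction = 3 then (1, -1)
  else (0, 0)

-- ===== PRECONDITION & SPEC =====
def Spec_parse_direction (direction : Int) (out : Int × Int) : Prop := out = parse_direction_alt direction
instance (direction : Int) (out : Int × Int) : Decidable (Spec_parse_direction direction out) := by unfold Spec_parse_direction; infer_instance

-- ===== CLAIM (what is proved, stated in full; the proofs are below) =====
def Claim_equal_parse_direction : Prop := ∀ (direction : Int), Dom_parse_direction direction → Spec_parse_direction direction (parse_direction direction)

-- ===== LEMMAS AND PROOFS =====

-- ===== VERDICT (by name: the statement is the Claim_ definition above) =====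
theorem parse_direction_spec : Claim_equal_parse_direction := by
  intro d _
  unfold Spec_parse_direction
  by_cases h7 : d = (7:Int)
  · subst h7; decide
  by_cases h8 : d = (8:Int)
  · subst h8; decide
  by_cases h9 : d = (9:Int)
  · subst h9; decide
  by_cases h4 : d = (4:Int)
  · subst h4; decide
  by_cases h6 : d = (6:Int)
  · subst h6; decide
  by_cases h1 : d = (1:Int)
  · subst h1; decide
  by_cases h2 : d = (2:Int)
  · subst h2; decide
  by_cases h3 : d = (3:Int)
  · subst h3; decide
  unfold parse_direction parse_direction_alt
  simp [List.mem_cons, h1, h2, h3, h4, h6, h7, h8, h9]
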